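-- pv_equiv track=rewrite | github.com/tomaszwozniakihg/rnalign2d | rnalign2d/rnalign2d/common.py | convert_to_file_data
-- ===== SOURCE A (Python) =====
-- def convert_to_file_data(file_data, dotbracket_structures):
--     new_file_data = []
--     for i in range(len(dotbracket_structures)):
--         sequence = file_data[i][1]
--         new_sequence = []
--         structure = dotbracket_structures[i]
--         b = 0
--         for a in range(len(structure)):
--             if structure[a] == '-':
--                 new_sequence.append('-')
--             else:
--                 while sequence[b] == '-':
--                     b += 1
--                 new_sequence.append(sequence[b])
--                 b += 1
--         new_sequence = ''.join(new_sequence)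
--         new_file_data.append((
--             file_data[i][0], new_sequence, structure))
--     return new_file_data
-- ===== SOURCE B (Python) =====
-- def convert_to_file_data(file_data, dotbracket_structures):
--     new_file_data = []
--     for (name, sequence, _), structure in zip(file_data, dotbracket_structures):
--         chars = sequence.replace('-', '')
--         pieces = []
--         pos = 0
--         for part in structure.split('-'):
--             pieces.append(chars[pos:pos + len(part)])
--             pos += len(part)
--         new_file_data.append((name, '-'.join(pieces), structure))
--     return new_file_data
-- ===== Notes on version B (the rewrite author's own statement) =====
-- stated objective: alternative
-- what changed: B works segment-wise instead of character-wise: it splits each structure on '-', fills every dash-free segment with one contiguous slice of the degapped sequence (sequence.replace('-','')), and rejoins with '-', replacing A's per-character loop with its inner gap-skipping while-loop.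
import Mathlib
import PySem

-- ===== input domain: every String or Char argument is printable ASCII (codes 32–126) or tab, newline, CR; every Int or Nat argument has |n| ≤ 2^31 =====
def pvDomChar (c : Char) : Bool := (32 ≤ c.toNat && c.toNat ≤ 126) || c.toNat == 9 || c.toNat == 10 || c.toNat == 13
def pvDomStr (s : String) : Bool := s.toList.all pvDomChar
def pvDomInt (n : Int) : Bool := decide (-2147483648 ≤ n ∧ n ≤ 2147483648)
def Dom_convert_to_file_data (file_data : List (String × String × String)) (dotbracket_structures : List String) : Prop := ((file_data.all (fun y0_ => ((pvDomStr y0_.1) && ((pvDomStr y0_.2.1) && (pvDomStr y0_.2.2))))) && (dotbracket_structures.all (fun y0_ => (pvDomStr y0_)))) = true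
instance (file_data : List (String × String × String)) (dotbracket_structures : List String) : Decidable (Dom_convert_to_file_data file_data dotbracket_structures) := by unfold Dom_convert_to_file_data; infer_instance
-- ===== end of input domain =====

-- B realigns segment-wise: it splits each structure on '-', fills every dash-free segment
-- with one contiguous slice of the degapped sequence and rejoins with '-', instead of A's
-- per-character walk with an inner gap-skipping while-loop; return values agree on Pre_.

-- ===== PORT A =====
-- the while-loop `while sequence[b] == '-': b += 1` (terminates by the remaining length;
-- if b runs out of range Python raises IndexError — excluded by Pre_, we return b)
def pvA_skip (seq : List Char) (b : Nat) : Nat :=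
  if h : b < seq.length then
    if seq[b] = '-' then pvA_skip seq (b + 1) else b
  else b
termination_by seq.length - b

-- the inner `for a in range(len(structure))` loop, state (b, new_sequence);
-- `sequence[b]` out of range (IndexError, outside Pre_) is rendered as '-'
def pvA_inner (seq : List Char) (b : Nat) : List Char → Nat × List Char
  | [] => (b, [])
  | c :: rest =>
    if c = '-' then
      let r := pvA_inner seq b rest
      (r.1, '-' :: r.2)
    else
      let b' := pvA_skip seq b
      let r := pvA_inner seq (b' + 1) rest
      (r.1, seq.getD b' '-' :: r.2)

def convert_to_file_data (file_data : List (String × String × String)) (dotbracket_structures : List String) : List (String × String × String) :=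
  (List.range dotbracket_structures.length).foldl (fun new_file_data i =>
    let entry := file_data.getD i ("", "", "")   -- file_data[i]; i in range under Pre_
    let struct := dotbracket_structures.getD i ""
    let new_sequence := (pvA_inner entry.2.1.toList 0 struct.toList).2
    new_file_data ++ [(entry.1, String.ofList new_sequence, struct)]) []

-- ===== PORT B =====
-- the `for part in structure.split('-')` loop of Source B: per segment one slice
-- chars[pos:pos+len(part)] of the degapped sequence, pos advanced by len(part)
def pvB_pieces (chars : List Char) (pos : Nat) : List (List Char) → List (List Char)
  | [] => []
  | part :: rest =>
    PySem.List.slice chars (some (pos : Int)) (some ((pos : Int) + (part.length : Int))) ::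
    pvB_pieces chars (pos + part.length) rest

def convert_to_file_data_alt (file_data : List (String × String × String)) (dotbracket_structures : List String) : List (String × String × String) :=
  (file_data.zip dotbracket_structures).map (fun p =>
    let chars := PySem.Chars.replace p.1.2.1.toList ['-'] []      -- sequence.replace('-','')
    let pieces := pvB_pieces chars 0 (PySem.Chars.splitOn p.2.toList ['-'])
    (p.1.1, String.ofList (PySem.Chars.join ['-'] pieces), p.2))  -- '-'.join(pieces)

-- ===== PRECONDITION & SPEC =====
-- Pre_ is exactly A's return domain: every structure has a file_data entry, and each
-- sequence holds at least as many non-'-' characters as its structure needs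
-- (otherwise Python A raises IndexError; B is free there, its slices just truncate).
def Pre_convert_to_file_data (file_data : List (String × String × String)) (dotbracket_structures : List String) : Prop :=
  dotbracket_structures.length ≤ file_data.length ∧
  ∀ i < dotbracket_structures.length,
    ((dotbracket_structures.getD i "").toList.filter (· ≠ '-')).length ≤
    (((file_data.getD i ("", "", "")).2.1).toList.filter (· ≠ '-')).length
instance (file_data : List (String × String × String)) (dotbracket_structures : List String) : Decidable (Pre_convert_to_file_data file_data dotbracket_structures) := by unfold Pre_convert_to_file_data; infer_instance

def pvWitness_convert_to_file_data : (List (String × String × String)) × List String :=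
  ([("a", "AC-G", "x")], ["(.-)"])

def Spec_convert_to_file_data (file_data : List (String × String × String)) (dotbracket_structures : List String) (out : List (String × String × String)) : Prop := out = convert_to_file_data_alt file_data dotbracket_structures
instance (file_data : List (String × String × String)) (dotbracket_structures : List String) (out : List (String × String × String)) : Decidable (Spec_convert_to_file_data file_data dotbracket_structures out) := by unfold Spec_convert_to_file_data; infer_instance

-- ===== CLAIM (what is proved, stated in full; the proofs are below) =====
def Claim_equal_convert_to_file_data : Prop := ∀ (file_data : List (String × String × String)) (dotbracket_structures : List String), Dom_convert_to_file_data file_data dotbracket_structures → Pre_convert_to_file_data file_data dotbracket_structures → Spec_convert_to_file_data file_data dotbracket_structures (convert_to_file_data file_data dotbracket_structures)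


-- ===== LEMMAS AND PROOFS =====

set_option maxRecDepth 4000

-- ---- proof-side reference loop: per-character fill (bridges A's walk and B's segments)
def pvB_fill (chars : List Char) (j : Nat) : List Char → List Char
  | [] => []
  | s :: rest =>
    if s = '-' then '-' :: pvB_fill chars j rest
    else chars.getD j '-' :: pvB_fill chars (j + 1) rest

-- ---- A side: specification of the skip loop
theorem pvA_skip_spec (seq : List Char) (b : Nat) (x : Char) (xs : List Char)
    (h : (seq.drop b).filter (· ≠ '-') = x :: xs) :
    seq.getD (pvA_skip seq b) '-' = x ∧
    (seq.drop (pvA_skip seq b + 1)).filter (· ≠ '-') = xs := by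
  fun_induction pvA_skip seq b with
  | case1 b hlt hdash ih =>
    apply ih
    rwa [List.drop_eq_getElem_cons hlt, List.filter_cons_of_neg (by simp [hdash])] at h
  | case2 b hlt hdash =>
    rw [List.drop_eq_getElem_cons hlt, List.filter_cons_of_pos (by simp [hdash])] at h
    obtain ⟨h1, h2⟩ := List.cons.inj h
    exact ⟨by rw [List.getD_eq_getElem _ _ hlt, h1], h2⟩
  | case3 b hlt =>
    rw [List.drop_of_length_le (Nat.le_of_not_lt hlt)] at h
    simp at h

-- A's inner loop from position b equals the per-character fill from counter j,
-- provided the gap-free suffixes coincide and are long enough for the structure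
theorem inner_eq_fill (struct seq chars : List Char) (b j : Nat)
    (hinv : (seq.drop b).filter (· ≠ '-') = chars.drop j)
    (hcnt : (struct.filter (· ≠ '-')).length ≤ ((seq.drop b).filter (· ≠ '-')).length) :
    (pvA_inner seq b struct).2 = pvB_fill chars j struct := by
  induction struct generalizing b j with
  | nil => simp [pvA_inner, pvB_fill]
  | cons c rest ih =>
    by_cases hc : c = '-'
    · simp only [pvA_inner, pvB_fill, hc, if_true]
      rw [List.filter_cons_of_neg (by simp [hc])] at hcnt
      simp [ih b j hinv hcnt]
    · simp only [pvA_inner, pvB_fill, hc, if_false]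
      rw [List.filter_cons_of_pos (by simp [hc])] at hcnt
      obtain ⟨x, xs, hxx⟩ := List.exists_cons_of_ne_nil
        (l := (seq.drop b).filter (· ≠ '-'))
        (by intro hnil; rw [hnil] at hcnt; simp at hcnt)
      obtain ⟨hget, hdrop⟩ := pvA_skip_spec seq b x xs hxx
      have hdj : chars.drop j = x :: xs := by rw [← hinv, hxx]
      have h0 : chars[j]? = some x := by
        have h00 : (chars.drop j)[0]? = some x := by rw [hdj]; rfl
        simpa using h00
      have hgj : chars.getD j '-' = x := by
        simp [List.getD_eq_getElem?_getD, h0]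
      have hdj1 : chars.drop (j + 1) = xs := by
        have h2 := congrArg List.tail hdj
        simpa [List.tail_drop] using h2
      have hcnt' : (rest.filter (· ≠ '-')).length ≤ ((seq.drop (pvA_skip seq b + 1)).filter (· ≠ '-')).length := by
        rw [hdrop]; rw [hxx] at hcnt; simpa using hcnt
      have hinv' : (seq.drop (pvA_skip seq b + 1)).filter (· ≠ '-') = chars.drop (j + 1) := by
        rw [hdrop, hdj1]
      simp only [List.getD_eq_getElem?_getD] at hget hgj
      simp [hget, hgj, ih _ _ hinv' hcnt', List.getD_eq_getElem?_getD]

theorem foldl_append_map {α β : Type} (g : α → β) (l : List α) (acc : List β) :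
    l.foldl (fun a x => a ++ [g x]) acc = acc ++ l.map g := by
  induction l generalizing acc with
  | nil => simp
  | cons x xs ih => simp [List.foldl, ih]

-- ---- B side: reference single-separator split
def pvSplit0 : List Char → List (List Char)
  | [] => [[]]
  | c :: t => if c = '-' then [] :: pvSplit0 t else (pvSplit0 t).modifyHead (c :: ·)

theorem pvSplit0_ne_nil (l : List Char) : pvSplit0 l ≠ [] := by
  cases l with
  | nil => simp [pvSplit0]
  | cons c t =>
    simp only [pvSplit0]
    split_ifs
    · simp
    · intro h
      have := congrArg List.length h
      simp at this
      exact pvSplit0_ne_nil t this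

theorem pv_rgo_eq (fuel : Nat) (l acc : List Char) (h : l.length ≤ fuel) :
    PySem.Chars.replace.go ['-'] [] fuel l acc = acc.reverse ++ l.filter (· ≠ '-') := by
  induction fuel generalizing l acc with
  | zero =>
    have : l = [] := List.eq_nil_of_length_eq_zero (Nat.le_zero.mp h)
    subst this; simp [PySem.Chars.replace.go]
  | succ f ih =>
    cases l with
    | nil => simp [PySem.Chars.replace.go]
    | cons c t =>
      simp only [List.length_cons] at h
      by_cases hc : c = '-'
      · subst hc
        have hpre : List.isPrefixOf ['-'] ('-' :: t) = true := by simp [List.isPrefixOf]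
        simp only [PySem.Chars.replace.go]
        rw [if_pos hpre]
        simp only [List.length_cons, List.length_nil, List.drop_succ_cons, List.drop_zero,
          List.reverse_nil, List.nil_append]
        rw [ih t acc (by omega)]
        simp
      · have hbe : ('-' == c) = false := by
          simp only [beq_eq_false_iff_ne, ne_eq]
          exact fun hh => hc hh.symm
        have hpre : List.isPrefixOf ['-'] (c :: t) = false := by
          simp [List.isPrefixOf, hbe]
        simp only [PySem.Chars.replace.go]
        rw [if_neg (by simp [hpre])]
        rw [ih t (c :: acc) (by omega)]
        rw [List.filter_cons_of_pos (by simp [hc])]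
        simp

theorem pv_replace_dash (s : List Char) :
    PySem.Chars.replace s ['-'] [] = s.filter (· ≠ '-') := by
  unfold PySem.Chars.replace
  simp only [List.isEmpty_cons, if_false, Bool.false_eq_true]
  simpa using pv_rgo_eq s.length s [] le_rfl

theorem pv_go_eq (fuel : Nat) (l cur : List Char) (acc : List (List Char)) (h : l.length ≤ fuel) :
    PySem.Chars.splitOn.go ['-'] fuel l cur acc =
      acc.reverse ++ (pvSplit0 l).modifyHead (cur.reverse ++ ·) := by
  induction fuel generalizing l cur acc with
  | zero =>
    have : l = [] := List.eq_nil_of_length_eq_zero (Nat.le_zero.mp h)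
    subst this; simp [PySem.Chars.splitOn.go, pvSplit0]
  | succ f ih =>
    cases l with
    | nil => simp [PySem.Chars.splitOn.go, pvSplit0]
    | cons c t =>
      simp only [List.length_cons] at h
      by_cases hc : c = '-'
      · subst hc
        have hpre : List.isPrefixOf ['-'] ('-' :: t) = true := by simp [List.isPrefixOf]
        simp only [PySem.Chars.splitOn.go]
        rw [if_pos hpre]
        simp only [List.length_cons, List.length_nil, List.drop_succ_cons, List.drop_zero]
        rw [ih t [] (cur.reverse :: acc) (by omega)]
        have hid : (fun x : List Char => List.reverse ([] : List Char) ++ x) = id := by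
          funext x; simp
        rw [hid, List.modifyHead_id]
        simp [pvSplit0]
      · have hbe : ('-' == c) = false := by
          simp only [beq_eq_false_iff_ne, ne_eq]
          exact fun hh => hc hh.symm
        have hpre : List.isPrefixOf ['-'] (c :: t) = false := by
          simp [List.isPrefixOf, hbe]
        simp only [PySem.Chars.splitOn.go]
        rw [if_neg (by simp [hpre])]
        rw [ih t (c :: cur) acc (by omega)]
        simp only [pvSplit0, hc, if_false]
        congr 1
        rw [List.modifyHead_modifyHead]
        congr 1
        funext x
        simp

theorem pv_splitOn_dash (s : List Char) :
    PySem.Chars.splitOn s ['-'] = pvSplit0 s := by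
  unfold PySem.Chars.splitOn
  rw [pv_go_eq (s.length + 1) s [] [] (by omega)]
  have h1 : (fun x => List.reverse ([] : List Char) ++ x) = id := by funext x; simp
  rw [h1, List.modifyHead_id]
  simp

theorem pv_intercalate_cons_cons (sep a b : List Char) (r : List (List Char)) :
    List.intercalate sep (a :: b :: r) = a ++ sep ++ List.intercalate sep (b :: r) := by
  simp [List.intercalate, List.intersperse]

theorem pv_intercalate_singleton (sep a : List Char) :
    List.intercalate sep [a] = a := by
  simp [List.intercalate]

theorem pv_intercalate_cons_head (sep X : List Char) (x : Char) (Y : List (List Char)) :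
    List.intercalate sep ((x :: X) :: Y) = x :: List.intercalate sep (X :: Y) := by
  cases Y with
  | nil => simp [pv_intercalate_singleton]
  | cons a r => simp [pv_intercalate_cons_cons]

-- B's segment slices, joined with '-', equal the per-character fill when enough chars remain
theorem pieces_eq_fill (ts chars : List Char) (pos : Nat)
    (hcnt : (ts.filter (· ≠ '-')).length + pos ≤ chars.length) :
    PySem.Chars.join ['-'] (pvB_pieces chars pos (pvSplit0 ts)) = pvB_fill chars pos ts := by
  induction ts generalizing pos with
  | nil =>
    have h0 : PySem.List.slice chars (some (pos : Int)) (some (pos : Int)) = [] := by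
      simpa using PySem.List.slice_natCast_add chars pos 0
    simp [pvSplit0, pvB_pieces, pvB_fill, PySem.Chars.join, h0, pv_intercalate_singleton]
  | cons c t ih =>
    by_cases hc : c = '-'
    · simp only [pvSplit0, hc, if_true]
      simp only [pvB_pieces, Nat.add_zero, List.length_nil]
      have hz : PySem.List.slice chars (some (pos : Int)) (some ((pos : Int) + ((0 : Nat) : Int))) = [] := by
        simpa using PySem.List.slice_natCast_add chars pos 0
      obtain ⟨a, r, har⟩ := List.exists_cons_of_ne_nil (pvSplit0_ne_nil t)
      have hcnt' : (t.filter (· ≠ '-')).length + pos ≤ chars.length := by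
        rw [List.filter_cons_of_neg (by simp [hc])] at hcnt; exact hcnt
      have := ih pos hcnt'
      rw [har] at this ⊢
      simp only [pvB_pieces] at this ⊢
      simp only [pvB_fill, if_true]
      rw [← this, hz]
      simp [PySem.Chars.join, pv_intercalate_cons_cons]
    · simp only [pvSplit0, hc, if_false]
      obtain ⟨h, tl, hht⟩ := List.exists_cons_of_ne_nil (pvSplit0_ne_nil t)
      rw [hht]
      simp only [List.modifyHead, pvB_pieces, List.length_cons]
      have hcnt1 : (t.filter (· ≠ '-')).length + (pos + 1) ≤ chars.length := by
        rw [List.filter_cons_of_pos (by simp [hc])] at hcnt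
        simp only [List.length_cons] at hcnt; omega
      have hpos : pos < chars.length := by
        rw [List.filter_cons_of_pos (by simp [hc])] at hcnt
        simp only [List.length_cons] at hcnt; omega
      have hslice1 : PySem.List.slice chars (some (pos : Int)) (some ((pos : Int) + ((h.length + 1 : Nat) : Int))) =
          chars[pos] :: (chars.drop (pos + 1)).take h.length := by
        rw [PySem.List.slice_natCast_add chars pos (h.length + 1)]
        rw [List.drop_eq_getElem_cons hpos, List.take_succ_cons]
      have hslice2 : PySem.List.slice chars (some ((pos + 1 : Nat) : Int)) (some (((pos + 1 : Nat) : Int) + ((h.length : Nat) : Int))) =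
          (chars.drop (pos + 1)).take h.length := PySem.List.slice_natCast_add chars (pos + 1) h.length
      have ihx := ih (pos + 1) hcnt1
      rw [hht] at ihx
      simp only [pvB_pieces] at ihx
      rw [hslice2] at ihx
      have harith : pos + (h.length + 1) = pos + 1 + h.length := by omega
      rw [hslice1, harith]
      simp only [pvB_fill, hc, if_false]
      rw [← ihx]
      simp only [PySem.Chars.join]
      rw [pv_intercalate_cons_head]
      congr 1
      rw [List.getD_eq_getElem _ _ hpos]

-- ===== VERDICT (by name: the statements are the Claim_ definitions above) =====
theorem convert_to_file_data_spec : Claim_equal_convert_to_file_data := by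
  intro fd ds _ hpre
  unfold Spec_convert_to_file_data convert_to_file_data convert_to_file_data_alt
  rw [foldl_append_map, List.nil_append]
  apply List.ext_getElem
  · simp [Nat.min_eq_right hpre.1]
  · intro i hi1 hi2
    simp only [List.getElem_map, List.getElem_range, List.getElem_zip]
    have hid : i < ds.length := by simpa using hi1
    have hif : i < fd.length := Nat.lt_of_lt_of_le hid hpre.1
    have e1 : fd.getD i ("", "", "") = fd[i] := List.getD_eq_getElem _ _ hif
    have e2 : ds.getD i "" = ds[i] := List.getD_eq_getElem _ _ hid
    have hcnt := hpre.2 i hid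
    rw [e1, e2] at hcnt ⊢
    rw [pv_replace_dash, pv_splitOn_dash]
    have hfill := pieces_eq_fill ds[i].toList (fd[i].2.1.toList.filter (· ≠ '-')) 0
      (by simpa using hcnt)
    have hA := inner_eq_fill ds[i].toList fd[i].2.1.toList (fd[i].2.1.toList.filter (· ≠ '-')) 0 0
      (by simp) (by simpa using hcnt)
    simp only [ne_eq, decide_not] at hfill hA
    simp [hA, hfill]
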